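-- pv_equiv track=rewrite | github.com/Delshi/image_walker | ImageWalker/imagewalker/services/file_operations_service.py | _clean_category_name
-- ===== SOURCE A (Python) =====
-- def _clean_category_name(category: str) -> str:
--     """Cleans and validates category name for filesystem use.
--
--     Args:
--         category: Original category name.
--
--     Returns:
--         Cleaned category name safe for filesystem.
--     """
--     if not category or not isinstance(category, str):
--         return "unknown"
--
--     invalid_chars = '<>:"/\\|?*'
--     for char in invalid_chars:
--         category = category.replace(char, "_")
--
--     category = category.strip()
--     if len(category) > 255:
--         category = category[:255]
--
--     return category
-- ===== SOURCE B (Python) =====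
-- def _clean_category_name(category: str) -> str:
--     """Cleans and validates category name for filesystem use (single-pass)."""
--     if not category or not isinstance(category, str):
--         return "unknown"
--
--     invalid = set('<>:"/\\|?*')
--     cleaned = ''.join('_' if c in invalid else c for c in category).strip()
--     return cleaned[:255]
-- ===== Notes on version B (the rewrite author's own statement) =====
-- stated objective: idiomatic
-- what changed: Replaced the nine sequential whole-string .replace passes with one character-wise pass using a prebuilt set of invalid characters, and replaced the conditional length-255 truncation with an unconditional clamping slice.
import Mathlib
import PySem

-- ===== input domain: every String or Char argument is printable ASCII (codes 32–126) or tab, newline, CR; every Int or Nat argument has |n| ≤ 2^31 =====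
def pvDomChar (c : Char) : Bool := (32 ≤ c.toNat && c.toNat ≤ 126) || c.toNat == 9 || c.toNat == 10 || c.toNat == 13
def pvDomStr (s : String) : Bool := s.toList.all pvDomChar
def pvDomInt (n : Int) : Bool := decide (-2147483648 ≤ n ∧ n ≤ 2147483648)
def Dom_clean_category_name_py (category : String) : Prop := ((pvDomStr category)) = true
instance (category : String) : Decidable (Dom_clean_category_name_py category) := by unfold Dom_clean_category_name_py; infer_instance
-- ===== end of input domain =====

-- B replaces A's nine sequential whole-string replace passes by one character-wise
-- pass over a prebuilt set of invalid characters (idiomatic; return value only).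

-- ===== PORT A =====
def clean_category_name_py (category : String) : String :=
  if category == "" then "unknown"
  else
    let invalid_chars : List Char := "<>:\"/\\|?*".toList
    let category := invalid_chars.foldl
      (fun s ch => PySem.Str.replace s (String.ofList [ch]) "_") category
    let category := PySem.Str.strip category
    if PySem.Str.len category > 255 then PySem.Str.slice category none (some 255)
    else category

-- ===== PORT B =====
def clean_category_name_py_alt (category : String) : String :=
  if category == "" then "unknown"
  else
    let invalid : List Char := PySem.Set.ofList "<>:\"/\\|?*".toList
    let cleaned := PySem.Str.strip
      (String.ofList (category.toList.map (fun c => if invalid.contains c then '_' else c)))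
    PySem.Str.slice cleaned none (some 255)

-- ===== PRECONDITION & SPEC =====
def Spec_clean_category_name_py (category : String) (out : String) : Prop := out = clean_category_name_py_alt category
instance (category : String) (out : String) : Decidable (Spec_clean_category_name_py category out) := by unfold Spec_clean_category_name_py; infer_instance

-- ===== CLAIM (what is proved, stated in full; the proofs are below) =====
def Claim_equal_clean_category_name_py : Prop := ∀ (category : String), Dom_clean_category_name_py category → Spec_clean_category_name_py category (clean_category_name_py category)

-- ===== LEMMAS AND PROOFS =====

-- Single-char replace on a char list is a pointwise map.
theorem replace_go_single (a b : Char) :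
    ∀ (fuel : Nat) (l acc : List Char), l.length ≤ fuel →
      PySem.Chars.replace.go [a] [b] fuel l acc
        = acc.reverse ++ l.map (fun c => if c = a then b else c) := by
  intro fuel
  induction fuel with
  | zero =>
      intro l acc h
      have : l = [] := List.eq_nil_of_length_eq_zero (Nat.le_zero.mp h)
      subst this
      simp [PySem.Chars.replace.go]
  | succ n ih =>
      intro l acc h
      cases l with
      | nil => simp [PySem.Chars.replace.go]
      | cons c t =>
          by_cases hc : a = c
          · subst hc
            have hp : List.isPrefixOf [a] (a :: t) = true := by
              simp [List.isPrefixOf]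
            simp only [PySem.Chars.replace.go, hp, if_true]
            rw [ih _ _ (by simpa using Nat.le_of_succ_le_succ h)]
            simp
          · have hp : List.isPrefixOf [a] (c :: t) = false := by
              simp [List.isPrefixOf, hc]
            have hc' : c ≠ a := fun h' => hc h'.symm
            simp only [PySem.Chars.replace.go, hp]
            rw [ih t (c :: acc) (by simpa using Nat.le_of_succ_le_succ h)]
            simp [hc']

theorem replace_single (s : List Char) (a b : Char) :
    PySem.Chars.replace s [a] [b] = s.map (fun c => if c = a then b else c) := by
  unfold PySem.Chars.replace
  simp only [List.isEmpty_cons, if_false, Bool.false_eq_true]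
  simpa using replace_go_single a b s.length s [] (le_refl _)

-- A fold of single-char replaces by '_' over characters none of which is '_'
-- is a single membership map.
theorem foldl_replace_eq_map (inv : List Char) (hinv : '_' ∉ inv) :
    ∀ s : List Char,
      inv.foldl (fun s ch => PySem.Chars.replace s [ch] ['_']) s
        = s.map (fun c => if inv.contains c then '_' else c) := by
  induction inv with
  | nil => intro s; simp
  | cons ch rest ih =>
      intro s
      have hrest : '_' ∉ rest := fun h => hinv (List.mem_cons_of_mem _ h)
      simp only [List.foldl_cons]
      rw [replace_single, ih hrest, List.map_map]
      apply List.map_congr_left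
      intro c _
      by_cases hc : c = ch
      · subst hc
        simp [List.contains_eq_mem, hrest]
      · simp [List.contains_eq_mem, hc]

-- ===== VERDICT (by name: the statement is the Claim_ definition above) =====
theorem clean_category_name_py_spec : Claim_equal_clean_category_name_py := by
  intro category _
  unfold Spec_clean_category_name_py clean_category_name_py clean_category_name_py_alt
  by_cases hemp : category == ""
  · simp [hemp]
  · simp only [hemp, Bool.false_eq_true, if_false]
    have hfold : ∀ (l : List Char) (s : String),
        (l.foldl (fun s ch => PySem.Str.replace s (String.ofList [ch]) "_") s).toList
          = l.foldl (fun cs ch => PySem.Chars.replace cs [ch] ['_']) s.toList := by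
      intro l
      induction l with
      | nil => intro s; rfl
      | cons ch rest ih =>
          intro s
          simp only [List.foldl_cons]
          rw [ih]
          congr 1
          rw [PySem.Str.toList_replace]
          simp
    have hset : PySem.Set.ofList "<>:\"/\\|?*".toList = "<>:\"/\\|?*".toList := by decide
    have hST :
        PySem.Str.strip
            ("<>:\"/\\|?*".toList.foldl
              (fun s ch => PySem.Str.replace s (String.ofList [ch]) "_") category)
          = PySem.Str.strip
              (String.ofList (category.toList.map
                (fun c => if (PySem.Set.ofList "<>:\"/\\|?*".toList).contains c then '_' else c))) := by
      apply String.toList_injective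
      rw [PySem.Str.toList_strip, PySem.Str.toList_strip]
      apply congrArg PySem.Chars.strip
      rw [hfold, foldl_replace_eq_map _ (by decide), hset]
      simp
    simp only [hST]
    set T := PySem.Str.strip
        (String.ofList (category.toList.map
          (fun c => if (PySem.Set.ofList "<>:\"/\\|?*".toList).contains c then '_' else c))) with hT
    split_ifs with hlen
    · rfl
    · apply String.toList_injective
      rw [PySem.Str.toList_slice]
      have hle : T.toList.length ≤ 255 := by
        have := hlen
        simp only [PySem.Str.len, not_lt] at this
        exact_mod_cast this
      simp only [PySem.Chars.slice_eq_listSlice]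
      rw [PySem.List.slice_to]
      · have h255 : ((255 : Int)).toNat = 255 := by decide
        rw [h255]
        exact (List.take_of_length_le hle).symm
      · norm_num
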